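-- pv_equiv track=rewrite | github.com/yesitsfebreeze/.files | wezterm/finder_tui.py | match_picker
-- ===== SOURCE A (Python) =====
-- def get_unique_prefixes(names):
--     """Compute unique prefix lengths for each picker name."""
--     prefixes = {}
--     for i, name in enumerate(names):
--         length = 1
--         while length <= len(name):
--             prefix = name[:length].lower()
--             unique = True
--             for j, other in enumerate(names):
--                 if i != j and other[:length].lower() == prefix:
--                     unique = False
--                     break
--             if unique:
--                 break
--             length += 1
--         prefixes[name] = length
--     return prefixes
--
-- def match_picker(picks, typed):
--     """Find which picker matches the typed text."""
--     if not typed: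
--         return None
--     typed_lower = typed.lower()
--     prefixes = get_unique_prefixes(picks)
--
--     # Exact prefix match
--     for name in picks:
--         plen = prefixes[name]
--         if typed_lower == name[:plen].lower():
--             return name
--
--     # Partial match
--     for name in picks:
--         if name.lower().startswith(typed_lower):
--             return name
--
--     return None
-- ===== SOURCE B (Python) =====
-- def _lcp(a, b):
--     n = min(len(a), len(b))
--     i = 0
--     while i < n and a[i] == b[i]:
--         i += 1
--     return i
--
-- def match_picker(picks, typed):
--     """Find which picker matches the typed text."""
--     if not typed:
--         return None
--     typed_lower = typed.lower()
--     lows = [name.lower() for name in picks]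
--     exact = None
--     partial = None
--     for i, (name, low) in enumerate(zip(picks, lows)):
--         maxlcp = 0
--         for j, other in enumerate(lows):
--             if i != j:
--                 l = _lcp(low, other)
--                 if l > maxlcp:
--                     maxlcp = l
--         plen = min(maxlcp, len(low)) + 1
--         if exact is None and typed_lower == low[:plen]:
--             exact = name
--         if partial is None and low.startswith(typed_lower):
--             partial = name
--     return exact if exact is not None else partial
-- ===== Notes on version B (the rewrite author's own statement) =====
-- stated objective: alternative
-- what changed: A grows each name's candidate prefix one character at a time, rescanning and re-lowercasing every other name's slice at each length, then runs two separate matching loops; B lowercases every name once, computes each unique prefix length in closed form as min(max LCP with the other lowered names, len(name)) + 1, and finds the exact and partial matches in a single fused pass.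
import Mathlib
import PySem

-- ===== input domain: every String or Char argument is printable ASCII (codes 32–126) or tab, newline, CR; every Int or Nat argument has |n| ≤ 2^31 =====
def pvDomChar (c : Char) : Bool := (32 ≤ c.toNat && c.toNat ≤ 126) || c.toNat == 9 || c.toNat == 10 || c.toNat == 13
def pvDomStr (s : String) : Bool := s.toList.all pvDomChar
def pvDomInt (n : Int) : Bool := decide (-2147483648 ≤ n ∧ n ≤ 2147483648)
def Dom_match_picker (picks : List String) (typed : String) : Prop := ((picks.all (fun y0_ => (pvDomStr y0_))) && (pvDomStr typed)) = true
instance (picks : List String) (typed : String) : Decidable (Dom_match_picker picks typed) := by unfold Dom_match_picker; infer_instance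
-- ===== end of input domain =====

-- B replaces A's incremental unique-prefix search (grow the prefix one character at a time, rescanning and
-- re-lowercasing the other names at every length) by a closed form — unique prefix length of a name =
-- min(max LCP with the other lowercased names, len(name)) + 1 — over names lowercased once, and fuses
-- A's two matching loops into a single pass; objective: alternative (a different algorithm of similar cost).

-- ===== PORT A =====
-- inner 'for j, other in enumerate(names)' loop with its break: false = some other shares the prefix
def aUniqueLoop (i : Int) (L : Nat) (pfx : List Char) : List (Int × String) → Bool
  | [] => true
  | (j, other) :: rest =>
      if i ≠ j ∧ PySem.Chars.lower (PySem.List.slice other.toList none (some (L : Int))) = pfx then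
        false
      else aUniqueLoop i L pfx rest

-- 'while length <= len(name)' loop; returns the final value of 'length'
def aWhileLoop (names : List (Int × String)) (i : Int) (name : String) (L : Nat) : Nat :=
  if L ≤ name.toList.length then
    if aUniqueLoop i L (PySem.Chars.lower (PySem.List.slice name.toList none (some (L : Int)))) names then
      L
    else aWhileLoop names i name (L + 1)
  else L
termination_by name.toList.length + 1 - L
decreasing_by simp only [String.length_toList] at *; omega

def aPrefixes (names : List String) : PySem.Dict String Nat :=
  (PySem.List.enumerate names).foldl
    (fun d p => d.insert p.2 (aWhileLoop (PySem.List.enumerate names) p.1 p.2 1))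
    PySem.Dict.empty

-- first 'for name in picks' loop (exact prefix match)
def aExactLoop (prefixes : PySem.Dict String Nat) (tl : List Char) : List String → Option String
  | [] => none
  | name :: rest =>
      if tl = PySem.Chars.lower (PySem.List.slice name.toList none (some ((prefixes.getD name 0 : Nat) : Int))) then
        some name
      else aExactLoop prefixes tl rest

-- second 'for name in picks' loop (partial match)
def aPartialLoop (tl : List Char) : List String → Option String
  | [] => none
  | name :: rest =>
      if PySem.Chars.startswith (PySem.Chars.lower name.toList) tl then some name
      else aPartialLoop tl rest

def match_picker (picks : List String) (typed : String) : Option String :=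
  if typed.toList = [] then none
  else
    let typedLower := PySem.Chars.lower typed.toList
    let prefixes := aPrefixes picks
    match aExactLoop prefixes typedLower picks with
    | some name => some name
    | none => aPartialLoop typedLower picks

-- ===== PORT B =====
-- _lcp(a, b): length of the longest common prefix
def bLcp : List Char → List Char → Nat
  | a :: as, b :: bs => if a = b then bLcp as bs + 1 else 0
  | _, _ => 0

-- inner 'for j, other in enumerate(lows)' loop accumulating maxlcp
def bMaxLcp (i : Int) (low : List Char) : List (Int × List Char) → Nat → Nat
  | [], m => m
  | (j, other) :: rest, m =>
      if i ≠ j then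
        if bLcp low other > m then bMaxLcp i low rest (bLcp low other)
        else bMaxLcp i low rest m
      else bMaxLcp i low rest m

-- one iteration of B's single pass; state = (exact, partial)
def bStep (tl : List Char) (enumLows : List (Int × List Char))
    (st : Option String × Option String) (p : Int × (String × List Char)) :
    Option String × Option String :=
  let plen := min (bMaxLcp p.1 p.2.2 enumLows 0) p.2.2.length + 1
  let st1 := if st.1 = none ∧ tl = p.2.2.take plen then (some p.2.1, st.2) else st
  if st1.2 = none ∧ PySem.Chars.startswith p.2.2 tl then (st1.1, some p.2.1) else st1

def match_picker_alt (picks : List String) (typed : String) : Option String :=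
  if typed.toList = [] then none
  else
    let tl := PySem.Chars.lower typed.toList
    let lows := picks.map (fun s => PySem.Chars.lower s.toList)
    let res := (PySem.List.enumerate (picks.zip lows)).foldl (bStep tl (PySem.List.enumerate lows)) (none, none)
    match res.1 with
    | some n => some n
    | none => res.2

-- ===== PRECONDITION & SPEC =====
def Spec_match_picker (picks : List String) (typed : String) (out : Option String) : Prop := out = match_picker_alt picks typed
instance (picks : List String) (typed : String) (out : Option String) : Decidable (Spec_match_picker picks typed out) := by unfold Spec_match_picker; infer_instance

-- ===== CLAIM (what is proved, stated in full; the proofs are below) =====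
def Claim_equal_match_picker : Prop := ∀ (picks : List String) (typed : String), Dom_match_picker picks typed → Spec_match_picker picks typed (match_picker picks typed)

-- ===== LEMMAS AND PROOFS =====

theorem bLcp_self (a : List Char) : bLcp a a = a.length := by
  induction a with
  | nil => rfl
  | cons x xs ih => simp [bLcp, ih]

-- a prefix of length L of `a` (L ≤ len a) is matched by `b` iff the LCP reaches L
theorem take_eq_take_iff (a b : List Char) (L : Nat) (hL : L ≤ a.length) :
    b.take L = a.take L ↔ L ≤ bLcp a b := by
  induction a generalizing b L with
  | nil =>
      have : L = 0 := by simpa using hL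
      subst this; simp
  | cons x xs ih =>
      cases L with
      | zero => simp
      | succ L =>
          cases b with
          | nil => simp [bLcp]
          | cons y ys =>
              simp only [List.take_succ_cons, List.cons.injEq, bLcp]
              by_cases hxy : x = y
              · subst hxy
                rw [if_pos rfl]
                have hL' : L ≤ xs.length := by simpa using hL
                constructor
                · rintro ⟨-, h⟩
                  have := (ih ys L hL').mp h; omega
                · intro h
                  exact ⟨rfl, (ih ys L hL').mpr (by omega)⟩
              · rw [if_neg hxy]
                constructor
                · rintro ⟨h, -⟩
                  exact absurd h.symm hxy
                · intro h
                  exact absurd h (by omega)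

theorem aUniqueLoop_eq_true_iff (i : Int) (L : Nat) (pfx : List Char) (l : List (Int × String)) :
    aUniqueLoop i L pfx l = true ↔
      ∀ p ∈ l, p.1 ≠ i → PySem.Chars.lower (PySem.List.slice p.2.toList none (some (L : Int))) ≠ pfx := by
  induction l with
  | nil => simp [aUniqueLoop]
  | cons q rest ih =>
      obtain ⟨j, other⟩ := q
      by_cases h : i ≠ j ∧ PySem.Chars.lower (PySem.List.slice other.toList none (some (L : Int))) = pfx
      · simp only [aUniqueLoop, if_pos h]
        constructor
        · intro hf; exact absurd hf (by simp)
        · intro hall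
          exact absurd h.2 (hall (j, other) (by simp) (Ne.symm h.1))
      · simp only [aUniqueLoop, if_neg h, ih]
        constructor
        · intro hall p hp hpi
          rcases List.mem_cons.mp hp with hp | hp
          · intro hc
            rw [hp] at hpi hc
            exact h ⟨Ne.symm (by simpa using hpi), by simpa using hc⟩
          · exact hall p hp hpi
        · intro hall p hp hpi
          exact hall p (by simp [hp]) hpi

theorem bMaxLcp_ge (i : Int) (low : List Char) (l : List (Int × List Char)) (m : Nat) :
    m ≤ bMaxLcp i low l m ∧ ∀ p ∈ l, p.1 ≠ i → bLcp low p.2 ≤ bMaxLcp i low l m := by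
  induction l generalizing m with
  | nil => simp [bMaxLcp]
  | cons q rest ih =>
      obtain ⟨j, other⟩ := q
      by_cases hij : i ≠ j
      · by_cases hgt : bLcp low other > m
        · have h := ih (bLcp low other)
          refine ⟨?_, ?_⟩
          · have := h.1; simp only [bMaxLcp, if_pos hij, if_pos hgt]; omega
          · intro p hp hpi
            rcases List.mem_cons.mp hp with hp | hp
            · subst hp
              simp only [bMaxLcp, if_pos hij, if_pos hgt]
              simpa using h.1
            · simpa [bMaxLcp, hij, hgt] using h.2 p hp hpi
        · have h := ih m
          refine ⟨by simpa [bMaxLcp, hij, hgt] using h.1, ?_⟩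
          intro p hp hpi
          rcases List.mem_cons.mp hp with hp | hp
          · have h1 : bLcp low p.2 ≤ m := by
              subst hp; simpa using Nat.le_of_not_lt hgt
            simpa [bMaxLcp, hij, hgt] using le_trans h1 h.1
          · simpa [bMaxLcp, hij, hgt] using h.2 p hp hpi
      · have h := ih m
        rw [not_not] at hij
        refine ⟨by simpa [bMaxLcp, hij] using h.1, ?_⟩
        intro p hp hpi
        rcases List.mem_cons.mp hp with hp | hp
        · exact absurd (by simp [hp, hij]) hpi
        · simpa [bMaxLcp, hij] using h.2 p hp hpi

theorem bMaxLcp_mem (i : Int) (low : List Char) (l : List (Int × List Char)) (m : Nat) :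
    bMaxLcp i low l m = m ∨ ∃ p ∈ l, p.1 ≠ i ∧ bMaxLcp i low l m = bLcp low p.2 := by
  induction l generalizing m with
  | nil => simp [bMaxLcp]
  | cons q rest ih =>
      obtain ⟨j, other⟩ := q
      by_cases hij : i ≠ j
      · by_cases hgt : bLcp low other > m
        · rcases ih (bLcp low other) with h | ⟨p, hp, hpi, hv⟩
          · right
            exact ⟨(j, other), by simp, Ne.symm hij, by simpa [bMaxLcp, hij, hgt] using h⟩
          · right
            exact ⟨p, by simp [hp], hpi, by simpa [bMaxLcp, hij, hgt] using hv⟩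
        · rcases ih m with h | ⟨p, hp, hpi, hv⟩
          · left; simpa [bMaxLcp, hij, hgt] using h
          · right
            exact ⟨p, by simp [hp], hpi, by simpa [bMaxLcp, hij, hgt] using hv⟩
      · rw [not_not] at hij
        rcases ih m with h | ⟨p, hp, hpi, hv⟩
        · left; simpa [bMaxLcp, hij] using h
        · right
          exact ⟨p, by simp [hp], hpi, by simpa [bMaxLcp, hij] using hv⟩

-- the lowered name list of picks (same term as B builds)
def lowsOf (picks : List String) : List (List Char) :=
  picks.map (fun s => PySem.Chars.lower s.toList)

-- the max-LCP of position i against all other (lowered) names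
def mAt (picks : List String) (i : Int) (low : List Char) : Nat :=
  bMaxLcp i low (PySem.List.enumerate (lowsOf picks)) 0

-- "every other name's lowered LCP with low is < L"
def allBelow (picks : List String) (i : Int) (low : List Char) (L : Nat) : Prop :=
  ∀ (k : Nat) (_ : k < picks.length), (k : Int) ≠ i →
    bLcp low (PySem.Chars.lower picks[k].toList) < L

theorem mAt_lt_iff (picks : List String) (i : Int) (low : List Char) (L : Nat) (hL : 1 ≤ L) :
    (mAt picks i low < L ↔ allBelow picks i low L) := by
  constructor
  · intro hlt k hk hki
    have hmem : ((k : Int), PySem.Chars.lower picks[k].toList) ∈ PySem.List.enumerate (lowsOf picks) := by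
      rw [PySem.List.mem_enumerate_iff]
      exact ⟨k, by simpa [lowsOf] using hk, by simp [lowsOf]⟩
    have := (bMaxLcp_ge i low (PySem.List.enumerate (lowsOf picks)) 0).2 _ hmem hki
    exact lt_of_le_of_lt this hlt
  · intro hall
    rcases bMaxLcp_mem i low (PySem.List.enumerate (lowsOf picks)) 0 with h | ⟨p, hp, hpi, hv⟩
    · unfold mAt; omega
    · rw [PySem.List.mem_enumerate_iff] at hp
      obtain ⟨k, hk, hpk⟩ := hp
      have hk' : k < picks.length := by simpa [lowsOf] using hk
      have h2 : p.2 = PySem.Chars.lower picks[k].toList := by simp [hpk, lowsOf]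
      have h1 : p.1 = (k : Int) := by simp [hpk]
      unfold mAt
      rw [hv, h2]
      exact hall k hk' (h1 ▸ hpi)

-- A's uniqueness test at length L equals "mAt < L", for L ≤ len(name)
theorem unique_iff_allBelow (picks : List String) (i : Int) (name : String) (L : Nat)
    (hL : L ≤ name.toList.length) :
    (aUniqueLoop i L (PySem.Chars.lower (PySem.List.slice name.toList none (some (L : Int))))
        (PySem.List.enumerate picks) = true ↔
      allBelow picks i (PySem.Chars.lower name.toList) L) := by
  rw [aUniqueLoop_eq_true_iff]
  have hlen : L ≤ (PySem.Chars.lower name.toList).length := by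
    simpa [PySem.Chars.lower] using hL
  constructor
  · intro hall k hk hki
    have hmem : ((k : Int), picks[k]) ∈ PySem.List.enumerate picks := by
      rw [PySem.List.mem_enumerate_iff]; exact ⟨k, hk, by simp⟩
    have h := hall _ hmem hki
    by_contra hge
    apply h
    rw [PySem.List.slice_to_natCast, PySem.List.slice_to_natCast]
    have ht : (PySem.Chars.lower picks[k].toList).take L = (PySem.Chars.lower name.toList).take L :=
      (take_eq_take_iff _ _ _ hlen).mpr (by omega)
    simpa [PySem.Chars.lower, List.map_take] using ht
  · intro hall p hp hpi hc
    rw [PySem.List.mem_enumerate_iff] at hp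
    obtain ⟨k, hk, hpk⟩ := hp
    have hki : (k : Int) ≠ i := by rw [hpk] at hpi; simpa using hpi
    have h2 : p.2 = picks[k] := by simp [hpk]
    rw [h2, PySem.List.slice_to_natCast, PySem.List.slice_to_natCast] at hc
    have hc' : (PySem.Chars.lower picks[k].toList).take L = (PySem.Chars.lower name.toList).take L := by
      simpa [PySem.Chars.lower, List.map_take] using hc
    have := (take_eq_take_iff _ _ _ hlen).mp hc'
    exact absurd this (by have := hall k hk hki; omega)

-- the closed form for A's while loop
theorem aWhile_closed (picks : List String) (i : Int) (name : String) :
    ∀ (fuel L : Nat), 1 ≤ L →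
      L ≤ min (mAt picks i (PySem.Chars.lower name.toList)) name.toList.length + 1 →
      name.toList.length + 1 - L ≤ fuel →
      aWhileLoop (PySem.List.enumerate picks) i name L =
        min (mAt picks i (PySem.Chars.lower name.toList)) name.toList.length + 1 := by
  intro fuel
  induction fuel with
  | zero =>
      intro L h1 h2 hf
      rw [aWhileLoop]
      rw [if_neg (by omega)]
      omega
  | succ fuel ih =>
      intro L h1 h2 hf
      rw [aWhileLoop]
      by_cases hle : L ≤ name.toList.length
      · rw [if_pos hle]
        by_cases hm : mAt picks i (PySem.Chars.lower name.toList) < L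
        · rw [if_pos ((unique_iff_allBelow picks i name L hle).mpr
            ((mAt_lt_iff picks i _ L h1).mp hm))]
          omega
        · rw [if_neg (by
            intro hu
            exact hm ((mAt_lt_iff picks i _ L h1).mpr
              ((unique_iff_allBelow picks i name L hle).mp hu)))]
          exact ih (L + 1) (by omega) (by omega) (by omega)
      · rw [if_neg hle]
        omega

-- lookup after a fold of inserts whose value is constant (= c) on the key we look up
theorem getD_foldl_insert_const (f : Int × String → Nat) (l : List (Int × String))
    (d : PySem.Dict String Nat) (name : String) (c : Nat)
    (hc : ∀ p ∈ l, p.2 = name → f p = c) :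
    (l.foldl (fun d p => d.insert p.2 (f p)) d).getD name 0 =
      if name ∈ l.map (·.2) then c else d.getD name 0 := by
  induction l generalizing d with
  | nil => simp
  | cons q rest ih =>
      simp only [List.foldl_cons]
      rw [ih _ (fun p hp => hc p (by simp [hp]))]
      by_cases hmem : name ∈ rest.map (·.2)
      · simp [hmem]
      · rw [if_neg hmem, PySem.Dict.getD_insert]
        by_cases hq : name = q.2
        · rw [if_pos hq, if_pos (by simp [hq.symm]), hc q (by simp) hq.symm]
        · rw [if_neg hq, if_neg (by
            simp only [List.map_cons, List.mem_cons]
            rintro (h | h)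
            · exact hq h
            · exact hmem h)]

-- positions holding equal names get equal closed-form values
theorem mAt_dup (picks : List String) (k1 k2 : Nat) (hk1 : k1 < picks.length)
    (hk2 : k2 < picks.length) (hne : k1 ≠ k2) (heq : picks[k1] = picks[k2]) :
    picks[k1].toList.length ≤ mAt picks (k1 : Int) (PySem.Chars.lower picks[k1].toList) := by
  have hmem : ((k2 : Int), PySem.Chars.lower picks[k2].toList) ∈ PySem.List.enumerate (lowsOf picks) := by
    rw [PySem.List.mem_enumerate_iff]
    exact ⟨k2, by simpa [lowsOf] using hk2, by simp [lowsOf]⟩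
  have hne' : ((k2 : Nat) : Int) ≠ ((k1 : Nat) : Int) := by
    exact_mod_cast Ne.symm hne
  have h := (bMaxLcp_ge (k1 : Int) (PySem.Chars.lower picks[k1].toList)
      (PySem.List.enumerate (lowsOf picks)) 0).2 _ hmem hne'
  rw [← heq] at h
  calc picks[k1].toList.length = (PySem.Chars.lower picks[k1].toList).length := by
        simp [PySem.Chars.lower]
    _ = bLcp (PySem.Chars.lower picks[k1].toList) (PySem.Chars.lower picks[k1].toList) :=
        (bLcp_self _).symm
    _ ≤ _ := h

-- the per-position closed-form value
def valAt (picks : List String) (k : Nat) (hk : k < picks.length) : Nat :=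
  min (mAt picks (k : Int) (PySem.Chars.lower picks[k].toList)) picks[k].toList.length + 1

theorem valAt_congr (picks : List String) (k1 k2 : Nat) (hk1 : k1 < picks.length)
    (hk2 : k2 < picks.length) (heq : picks[k1] = picks[k2]) :
    valAt picks k1 hk1 = valAt picks k2 hk2 := by
  by_cases hne : k1 = k2
  · subst hne; rfl
  · have h1 := mAt_dup picks k1 k2 hk1 hk2 hne heq
    have h2 := mAt_dup picks k2 k1 hk2 hk1 (Ne.symm hne) heq.symm
    unfold valAt
    have hlen : picks[k1].toList.length = picks[k2].toList.length := by rw [heq]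
    omega

theorem aPrefixes_getD (picks : List String) (k : Nat) (hk : k < picks.length) :
    (aPrefixes picks).getD picks[k] 0 = valAt picks k hk := by
  unfold aPrefixes
  rw [getD_foldl_insert_const _ _ _ _ (valAt picks k hk) ?_ ]
  · rw [if_pos (by
      have : (PySem.List.enumerate picks).map (·.2) = picks := PySem.List.map_snd_enumerate picks 0
      rw [this]; exact List.getElem_mem hk)]
  · intro p hp hpname
    rw [PySem.List.mem_enumerate_iff] at hp
    obtain ⟨k', hk', hpk⟩ := hp
    have h2 : p.2 = picks[k'] := by simp [hpk]
    have h1 : p.1 = (k' : Int) := by simp [hpk]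
    rw [h1, h2]
    have heq : picks[k'] = picks[k] := by rw [← h2, hpname]
    rw [aWhile_closed picks (k' : Int) picks[k'] (picks[k'].toList.length + 1) 1 le_rfl
      (by omega) (by omega)]
    exact valAt_congr picks k' k hk' hk heq

-- A's two scanning loops are find?s
theorem aExactLoop_eq_find? (d : PySem.Dict String Nat) (tl : List Char) (l : List String) :
    aExactLoop d tl l = l.find? (fun name =>
      decide (tl = PySem.Chars.lower (PySem.List.slice name.toList none (some ((d.getD name 0 : Nat) : Int))))) := by
  induction l with
  | nil => rfl
  | cons name rest ih =>
      simp only [aExactLoop, ih, List.find?_cons, PySem.List.slice_to_natCast]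
      by_cases h : tl = PySem.Chars.lower (List.take (d.getD name 0) name.toList)
      · simp [h]
      · simp [h]

theorem aPartialLoop_eq_find? (tl : List Char) (l : List String) :
    aPartialLoop tl l = l.find? (fun name => PySem.Chars.startswith (PySem.Chars.lower name.toList) tl) := by
  induction l with
  | nil => rfl
  | cons name rest ih =>
      simp only [aPartialLoop, ih, List.find?_cons]
      by_cases h : PySem.Chars.startswith (PySem.Chars.lower name.toList) tl = true
      · simp [h]
      · simp [h]

-- keep the first hit
def upd (o v : Option String) : Option String :=
  match o with
  | some a => some a
  | none => v

-- B's single pass computes the pair of first hits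
theorem upd_if (o r : Option String) (P : Prop) [Decidable P] (v : String) :
    upd (if o = none ∧ P then some v else o) r = upd o (if P then some v else r) := by
  by_cases hP : P <;> cases o <;> simp [upd, hP]

theorem bFold (tl : List Char) (el : List (Int × List Char)) (l : List (Int × (String × List Char)))
    (st : Option String × Option String) :
    l.foldl (bStep tl el) st =
      (upd st.1 ((l.find? (fun p =>
          decide (tl = p.2.2.take (min (bMaxLcp p.1 p.2.2 el 0) p.2.2.length + 1)))).map (fun p => p.2.1)),
       upd st.2 ((l.find? (fun p => PySem.Chars.startswith p.2.2 tl)).map (fun p => p.2.1))) := by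
  induction l generalizing st with
  | nil => cases st with | mk e q => cases e <;> cases q <;> rfl
  | cons p rest ih =>
      obtain ⟨e, q⟩ := st
      have hstep : bStep tl el (e, q) p =
          ((if e = none ∧ tl = p.2.2.take (min (bMaxLcp p.1 p.2.2 el 0) p.2.2.length + 1)
              then some p.2.1 else e),
           (if q = none ∧ PySem.Chars.startswith p.2.2 tl = true then some p.2.1 else q)) := by
        unfold bStep
        by_cases hE : e = none ∧ tl = p.2.2.take (min (bMaxLcp p.1 p.2.2 el 0) p.2.2.length + 1) <;>
          by_cases hQ : q = none ∧ PySem.Chars.startswith p.2.2 tl = true <;>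
          simp [hE, hQ] <;> (try (split <;> rfl))
      rw [List.foldl_cons, hstep, ih]
      simp only [Prod.mk.injEq]
      refine ⟨?_, ?_⟩
      · rw [upd_if]
        congr 1
        by_cases hE' : tl = p.2.2.take (min (bMaxLcp p.1 p.2.2 el 0) p.2.2.length + 1)
        · simp [hE']
        · simp [hE']
      · rw [upd_if]
        congr 1
        by_cases hQ' : PySem.Chars.startswith p.2.2 tl = true
        · simp [hQ']
        · simp [hQ']

-- congruence for find? (pointwise-equal predicates on members)
theorem find?_congr_mem {α : Type} (l : List α) (p q : α → Bool)
    (h : ∀ x ∈ l, p x = q x) : l.find? p = l.find? q := by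
  induction l with
  | nil => rfl
  | cons x rest ih =>
      simp only [List.find?_cons, h x (by simp)]
      cases hq : q x with
      | true => rfl
      | false => exact ih (fun y hy => h y (by simp [hy]))

-- A's exact-match loop equals B's exact find? over the enumerated zip
theorem exact_eq (picks : List String) (tl : List Char) :
    aExactLoop (aPrefixes picks) tl picks =
      ((PySem.List.enumerate (picks.zip (picks.map (fun s => PySem.Chars.lower s.toList)))).find?
          (fun p => decide (tl = p.2.2.take
            (min (bMaxLcp p.1 p.2.2 (PySem.List.enumerate (picks.map (fun s => PySem.Chars.lower s.toList))) 0)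
              p.2.2.length + 1)))).map (fun p => p.2.1) := by
  rw [aExactLoop_eq_find?]
  set d := aPrefixes picks with hd
  have hpicks : ((PySem.List.enumerate (picks.zip (picks.map (fun s => PySem.Chars.lower s.toList)))).map
      (fun p => p.2.1)) = picks := by
    rw [show (fun p : Int × (String × List Char) => p.2.1) =
        (fun x : String × List Char => x.1) ∘ (fun p : Int × (String × List Char) => p.2) from rfl]
    rw [← List.map_map, PySem.List.map_snd_enumerate]
    exact List.map_fst_zip (by simp)
  conv_lhs => rw [← hpicks]
  rw [List.find?_map]
  congr 1
  apply find?_congr_mem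
  intro p hp
  rw [PySem.List.mem_enumerate_iff] at hp
  obtain ⟨k, hk, hpk⟩ := hp
  have hk' : k < picks.length := by simpa using hk
  have hzip : (picks.zip (picks.map (fun s => PySem.Chars.lower s.toList)))[k]'(by simpa using hk) =
      (picks[k], PySem.Chars.lower picks[k].toList) := by
    rw [List.getElem_zip]
    simp
  subst hpk
  simp only [Function.comp_apply, hzip, zero_add]
  rw [decide_eq_decide]
  rw [hd, aPrefixes_getD picks k hk']
  unfold valAt mAt lowsOf
  rw [PySem.List.slice_to_natCast]
  constructor
  · intro h
    rw [h]
    simp [PySem.Chars.lower, List.map_take]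
  · intro h
    rw [h]
    simp [PySem.Chars.lower, List.map_take]

-- A's partial-match loop equals B's partial find? over the enumerated zip
theorem partial_eq (picks : List String) (tl : List Char) :
    aPartialLoop tl picks =
      ((PySem.List.enumerate (picks.zip (picks.map (fun s => PySem.Chars.lower s.toList)))).find?
          (fun p => PySem.Chars.startswith p.2.2 tl)).map (fun p => p.2.1) := by
  rw [aPartialLoop_eq_find?]
  have hpicks : ((PySem.List.enumerate (picks.zip (picks.map (fun s => PySem.Chars.lower s.toList)))).map
      (fun p => p.2.1)) = picks := by
    rw [show (fun p : Int × (String × List Char) => p.2.1) =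
        (fun x : String × List Char => x.1) ∘ (fun p : Int × (String × List Char) => p.2) from rfl]
    rw [← List.map_map, PySem.List.map_snd_enumerate]
    exact List.map_fst_zip (by simp)
  conv_lhs => rw [← hpicks]
  rw [List.find?_map]
  congr 1
  apply find?_congr_mem
  intro p hp
  rw [PySem.List.mem_enumerate_iff] at hp
  obtain ⟨k, hk, hpk⟩ := hp
  have hzip : (picks.zip (picks.map (fun s => PySem.Chars.lower s.toList)))[k]'(by simpa using hk) =
      (picks[k]'(by simpa using hk), PySem.Chars.lower (picks[k]'(by simpa using hk)).toList) := by
    rw [List.getElem_zip]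
    simp
  subst hpk
  simp only [Function.comp_apply, hzip]

-- ===== VERDICT (by name: the statement is the Claim_ definition above) =====
theorem match_picker_spec : Claim_equal_match_picker := by
  unfold Claim_equal_match_picker
  intro picks typed _
  unfold Spec_match_picker match_picker match_picker_alt
  by_cases hty : typed.toList = []
  · simp [hty]
  · rw [if_neg hty, if_neg hty]
    simp only [bFold, upd]
    rw [exact_eq, partial_eq]
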